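-- pv_equiv track=rewrite | github.com/Vltirr/VCMI-Creature-Sprite-Pipeline | build_anim_json.py | pick_fallback
-- ===== SOURCE A (Python) =====
-- def pick_fallback(group_frames: dict[int, list[str]]) -> tuple[int, str] | None:
--     """
--     Returns (source_group, frame_name) following:
--     1) group2 first frame if exists
--     2) else first frame of first existing group by id asc
--     """
--     if 2 in group_frames and group_frames[2]:
--         return (2, group_frames[2][0])
--     for gid in sorted(group_frames.keys()):
--         frames = group_frames[gid]
--         if frames:
--             return (gid, frames[0])
--     return None
-- ===== SOURCE B (Python) =====
-- def pick_fallback(group_frames: dict[int, list[str]]) -> tuple[int, str] | None: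
--     """
--     Returns (source_group, frame_name) following:
--     1) group2 first frame if exists
--     2) else first frame of first existing group by id asc
--     """
--     if 2 in group_frames and group_frames[2]:
--         return (2, group_frames[2][0])
--     gid = min((g for g in group_frames if group_frames[g]), default=None)
--     if gid is None:
--         return None
--     return (gid, group_frames[gid][0])
-- ===== Notes on version B (the rewrite author's own statement) =====
-- stated objective: alternative
-- what changed: Replaces the full sort of all group ids followed by a first-nonempty scan with a single min-pass over the ids whose frame list is nonempty (default=None for the all-empty case), keeping the group-2 priority guard; trades the sort-and-scan for one linear selection pass.
import Mathlib
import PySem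

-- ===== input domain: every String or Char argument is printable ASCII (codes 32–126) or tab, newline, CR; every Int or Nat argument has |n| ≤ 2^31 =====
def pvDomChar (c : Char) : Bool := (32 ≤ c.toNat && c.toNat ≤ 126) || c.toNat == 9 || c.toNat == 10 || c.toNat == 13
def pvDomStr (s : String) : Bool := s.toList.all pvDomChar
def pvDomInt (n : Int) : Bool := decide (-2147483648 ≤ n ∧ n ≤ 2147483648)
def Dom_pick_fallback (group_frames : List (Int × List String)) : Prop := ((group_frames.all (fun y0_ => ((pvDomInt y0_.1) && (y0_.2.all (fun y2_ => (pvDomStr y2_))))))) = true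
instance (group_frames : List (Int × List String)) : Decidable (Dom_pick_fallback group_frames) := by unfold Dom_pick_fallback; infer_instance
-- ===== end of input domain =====

-- B replaces A's sort-then-scan over the group ids by a single min-pass over the ids with a nonempty frame list (same group-2 priority guard; alternative algorithm).


-- ===== PORT A =====
-- the 'for gid in sorted(group_frames.keys()): …' loop
def pickLoopA (d : PySem.Dict Int (List String)) : List Int → Option (Int × String)
  | [] => none
  | gid :: rest =>
    match PySem.Dict.get? d gid with
    | some (f :: _) => some (gid, f)
    | _ => pickLoopA d rest

def pick_fallback (group_frames : List (Int × List String)) : Option (Int × String) :=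
  let d : PySem.Dict Int (List String) := PySem.Dict.mk group_frames
  match PySem.Dict.get? d 2 with          -- if 2 in group_frames and group_frames[2]
  | some (f :: _) => some (2, f)          --   return (2, group_frames[2][0])
  | _ => pickLoopA d (PySem.List.sorted (PySem.Dict.keys d) (fun x => x) false)

-- ===== PORT B =====
def pick_fallback_alt (group_frames : List (Int × List String)) : Option (Int × String) :=
  let d : PySem.Dict Int (List String) := PySem.Dict.mk group_frames
  match PySem.Dict.get? d 2 with          -- unchanged group-2 guard
  | some (f :: _) => some (2, f)
  | _ =>
    -- gid = min((g for g in group_frames if group_frames[g]), default=None)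
    match PySem.List.min? ((PySem.Dict.keys d).filter (fun g => !(PySem.Dict.getD d g []).isEmpty)) (fun x => x) with
    | none => none
    | some gid => (PySem.Dict.getD d gid []).head?.map (fun f => (gid, f))

-- ===== PRECONDITION & SPEC =====
def Spec_pick_fallback (group_frames : List (Int × List String)) (out : Option (Int × String)) : Prop := out = pick_fallback_alt group_frames
instance (group_frames : List (Int × List String)) (out : Option (Int × String)) : Decidable (Spec_pick_fallback group_frames out) := by unfold Spec_pick_fallback; infer_instance

-- ===== CLAIM (what is proved, stated in full; the proofs are below) =====
def Claim_equal_pick_fallback : Prop := ∀ (group_frames : List (Int × List String)), Dom_pick_fallback group_frames → Spec_pick_fallback group_frames (pick_fallback group_frames)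

-- ===== LEMMAS AND PROOFS =====

-- A's loop returns, for the first gid in the list whose stored frame list is nonempty, that gid with the list's head.
theorem pickLoopA_eq_head (d : PySem.Dict Int (List String)) (l : List Int) :
    pickLoopA d l =
      match (l.filter (fun g => !(PySem.Dict.getD d g []).isEmpty)).head? with
      | none => none
      | some gid => (PySem.Dict.getD d gid []).head?.map (fun f => (gid, f)) := by
  induction l with
  | nil => rfl
  | cons gid rest ih =>
    simp only [pickLoopA, List.filter_cons]
    rcases h : PySem.Dict.get? d gid with _ | fs
    · simpa [PySem.Dict.getD_eq_get?_getD, h] using ih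
    · cases fs with
      | nil => simpa [PySem.Dict.getD_eq_get?_getD, h] using ih
      | cons f t => simp [PySem.Dict.getD_eq_get?_getD, h]

-- In a ≤-sorted list, min? with the identity key is the head.
theorem min?_id_of_sorted (l : List Int) (h : l.Pairwise (· ≤ ·)) :
    PySem.List.min? l (fun x => x) = l.head? := by
  cases l with
  | nil => rfl
  | cons x t =>
    rw [PySem.List.min?_id_cons]
    simp only [List.head?_cons, Option.some.injEq]
    have hx : ∀ y ∈ t, x ≤ y := (List.pairwise_cons.mp h).1
    clear h
    induction t generalizing x with
    | nil => rfl
    | cons y s ih =>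
      have hxy : x ≤ y := hx y (by simp)
      simp only [List.foldl_cons, min_eq_left hxy]
      exact ih x fun z hz => hx z (by simp [hz])

-- min? with the identity key is invariant under permutation.
theorem min?_id_perm (l l' : List Int) (h : l.Perm l') :
    PySem.List.min? l (fun x => x) = PySem.List.min? l' (fun x => x) := by
  rcases h1 : PySem.List.min? l (fun x => x) with _ | m
  · rw [PySem.List.min?_eq_none_iff] at h1
    subst h1
    rw [eq_comm, PySem.List.min?_eq_none_iff]
    exact h.nil_eq.symm ▸ rfl
  · rcases h2 : PySem.List.min? l' (fun x => x) with _ | m'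
    · rw [PySem.List.min?_eq_none_iff] at h2
      subst h2
      exact absurd (PySem.List.min?_mem h1) (by simp [h.eq_nil])
    · have hm : m ∈ l' := h.mem_iff.mp (PySem.List.min?_mem h1)
      have hm' : m' ∈ l := h.mem_iff.mpr (PySem.List.min?_mem h2)
      have h12 : m ≤ m' := PySem.List.min?_isMin h1 m' hm'
      have h21 : m' ≤ m := PySem.List.min?_isMin h2 m hm
      exact congrArg some (le_antisymm h12 h21)

-- A's else branch (scan of the sorted keys) equals B's else branch (min over the filtered keys).
theorem else_branch_eq (d : PySem.Dict Int (List String)) :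
    pickLoopA d (PySem.List.sorted (PySem.Dict.keys d) (fun x => x) false) =
      match PySem.List.min? ((PySem.Dict.keys d).filter (fun g => !(PySem.Dict.getD d g []).isEmpty)) (fun x => x) with
      | none => none
      | some gid => (PySem.Dict.getD d gid []).head?.map (fun f => (gid, f)) := by
  rw [pickLoopA_eq_head]
  have hperm : ((PySem.List.sorted (PySem.Dict.keys d) (fun x => x) false).filter
      (fun g => !(PySem.Dict.getD d g []).isEmpty)).Perm
      ((PySem.Dict.keys d).filter (fun g => !(PySem.Dict.getD d g []).isEmpty)) :=
    (PySem.List.sorted_perm (PySem.Dict.keys d) (fun x => x) false).filter _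
  have hsorted : ((PySem.List.sorted (PySem.Dict.keys d) (fun x => x) false).filter
      (fun g => !(PySem.Dict.getD d g []).isEmpty)).Pairwise (· ≤ ·) :=
    (PySem.List.sorted_pairwise (PySem.Dict.keys d) (fun x => x)).filter _
  rw [← min?_id_perm _ _ hperm, min?_id_of_sorted _ hsorted]

-- ===== VERDICT (by name: the statement is the Claim_ definition above) =====
theorem pick_fallback_spec : Claim_equal_pick_fallback := by
  intro gf _
  unfold Spec_pick_fallback
  show pick_fallback gf = pick_fallback_alt gf
  rcases h : PySem.Dict.get? (PySem.Dict.mk gf) 2 with _ | (_ | ⟨f, t⟩)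
  · simp only [pick_fallback, pick_fallback_alt, h]
    exact else_branch_eq _
  · simp only [pick_fallback, pick_fallback_alt, h]
    exact else_branch_eq _
  · simp only [pick_fallback, pick_fallback_alt, h]
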